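-- pv_equiv track=rewrite | github.com/zhiweixx/arithmetic-self-improve | lib/data_formats.py | split_digits_mult
-- ===== SOURCE A (Python) =====
-- def split_digits_mult(a, b):
--     a_digits = []
--     b_digits = []
--
--     while True:
--         if a > 0:
--             a_digits.append(a % 10)
--         if b > 0:
--             b_digits.append(b % 10)
--         # a_digits.append(a % 10)
--         # b_digits.append(b % 10)
--         a //= 10
--         b //= 10
--         if a == 0 and b == 0:
--             break
--     return a_digits, b_digits
-- ===== SOURCE B (Python) =====
-- def _digits(n):
--     if n <= 0:
--         return []
--     return [ord(c) - 48 for c in str(n)[::-1]]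
--
-- def split_digits_mult(a, b):
--     return _digits(a), _digits(b)
-- ===== Notes on version B (the rewrite author's own statement) =====
-- stated objective: alternative
-- what changed: Replaced the arithmetic %10 // 10 extraction loop by decimal string formatting: each number is converted with str(), the character string is reversed, and each character is mapped back to its digit value.
import Mathlib
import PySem

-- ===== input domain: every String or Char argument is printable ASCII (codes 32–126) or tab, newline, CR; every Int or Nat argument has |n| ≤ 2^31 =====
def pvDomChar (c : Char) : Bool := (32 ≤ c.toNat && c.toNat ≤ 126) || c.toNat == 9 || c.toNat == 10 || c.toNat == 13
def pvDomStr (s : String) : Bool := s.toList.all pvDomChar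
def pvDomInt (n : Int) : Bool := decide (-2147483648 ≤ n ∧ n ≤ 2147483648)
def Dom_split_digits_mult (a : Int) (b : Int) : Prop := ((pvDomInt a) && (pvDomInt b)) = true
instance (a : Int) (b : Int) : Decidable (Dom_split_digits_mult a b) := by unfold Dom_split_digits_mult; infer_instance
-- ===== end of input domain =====

-- B replaces A's arithmetic %10 // 10 loop by decimal string formatting: str(n),
-- reverse the characters, map each back to its digit value (objective: alternative).

-- ===== PORT A =====
-- A's 'while True' loop; the fuel only makes the recursion total — on Pre_ (0 ≤ a ∧ 0 ≤ b)
-- it is never exhausted (the Python loops forever on negative input, excluded by Pre_).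
def splitLoopA : Nat → Int → Int → List Int → List Int → List Int × List Int
  | 0, _, _, da, db => (da, db)
  | f+1, a, b, da, db =>
    let da' := if a > 0 then da ++ [PySem.Int.mod a 10] else da
    let db' := if b > 0 then db ++ [PySem.Int.mod b 10] else db
    let a' := PySem.Int.floordiv a 10
    let b' := PySem.Int.floordiv b 10
    if a' = 0 ∧ b' = 0 then (da', db') else splitLoopA f a' b' da' db'

def split_digits_mult (a : Int) (b : Int) : List Int × List Int :=
  splitLoopA (a.natAbs + b.natAbs + 1) a b [] []

-- ===== PORT B =====
-- Source B's '_digits': if n <= 0: []; else [ord(c) - 48 for c in str(n)[::-1]]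
def digitsStrB (n : Int) : List Int :=
  if n ≤ 0 then []
  else (PySem.Int.toChars n).reverse.map (fun c => ((c.toNat : Int) - 48))

def split_digits_mult_alt (a : Int) (b : Int) : List Int × List Int :=
  (digitsStrB a, digitsStrB b)

-- ===== PRECONDITION & SPEC =====
-- Pre_ excludes negative a or b: there Python A never returns ('//= 10' converges to -1, never 0, so the loop runs forever).
def Pre_split_digits_mult (a : Int) (b : Int) : Prop := 0 ≤ a ∧ 0 ≤ b
instance (a : Int) (b : Int) : Decidable (Pre_split_digits_mult a b) := by
  unfold Pre_split_digits_mult; infer_instance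

def pvWitness_split_digits_mult : Int × Int := (123, 45)

def Spec_split_digits_mult (a : Int) (b : Int) (out : List Int × List Int) : Prop :=
  out = split_digits_mult_alt a b
instance (a : Int) (b : Int) (out : List Int × List Int) : Decidable (Spec_split_digits_mult a b out) := by
  unfold Spec_split_digits_mult; infer_instance

-- ===== CLAIM (what is proved, stated in full; the proofs are below) =====
def Claim_equal_split_digits_mult : Prop :=
  ∀ (a : Int) (b : Int), Dom_split_digits_mult a b → Pre_split_digits_mult a b →
    Spec_split_digits_mult a b (split_digits_mult a b)

-- ===== LEMMAS AND PROOFS =====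

-- canonical little-endian decimal digits of a natural number (proof-side yardstick)
def pureDigits (n : Nat) : List Int :=
  if n = 0 then [] else ((n % 10 : Nat) : Int) :: pureDigits (n / 10)
termination_by n
decreasing_by exact Nat.div_lt_self (Nat.pos_of_ne_zero (by assumption)) (by norm_num)

theorem fd10 (n : Nat) : PySem.Int.floordiv (n : Int) 10 = ((n / 10 : Nat) : Int) := by
  exact_mod_cast PySem.Int.floordiv_natCast n 10

theorem md10 (n : Nat) : PySem.Int.mod (n : Int) 10 = ((n % 10 : Nat) : Int) := by
  exact_mod_cast PySem.Int.mod_natCast n 10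

theorem pureDigits_zero : pureDigits 0 = [] := by rw [pureDigits]; rfl

theorem pureDigits_pos (n : Nat) (h : n ≠ 0) :
    pureDigits n = ((n % 10 : Nat) : Int) :: pureDigits (n / 10) := by
  rw [pureDigits, if_neg h]

-- A's loop accumulates exactly the canonical digit lists
theorem splitLoopA_eq (f : Nat) : ∀ (m k : Nat) (da db : List Int), m + k ≤ f →
    splitLoopA (f + 1) (m : Int) (k : Int) da db = (da ++ pureDigits m, db ++ pureDigits k) := by
  induction f with
  | zero =>
    intro m k da db h
    have hm : m = 0 := by omega
    have hk : k = 0 := by omega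
    subst hm; subst hk
    simp [splitLoopA, pureDigits_zero]
  | succ f ih =>
    intro m k da db h
    rw [splitLoopA]
    simp only [fd10 m, md10 m, fd10 k, md10 k]
    by_cases hstop : ((m / 10 : Nat) : Int) = 0 ∧ ((k / 10 : Nat) : Int) = 0
    · rw [if_pos hstop]
      obtain ⟨hm, hk⟩ := hstop
      have hm' : m / 10 = 0 := by exact_mod_cast hm
      have hk' : k / 10 = 0 := by exact_mod_cast hk
      congr 1
      · by_cases h0 : m = 0
        · subst h0; simp [pureDigits_zero]
        · have : (m : Int) > 0 := by exact_mod_cast Nat.pos_of_ne_zero h0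
          rw [if_pos this, pureDigits_pos m h0, hm', pureDigits_zero]
      · by_cases h0 : k = 0
        · subst h0; simp [pureDigits_zero]
        · have : (k : Int) > 0 := by exact_mod_cast Nat.pos_of_ne_zero h0
          rw [if_pos this, pureDigits_pos k h0, hk', pureDigits_zero]
    · rw [if_neg hstop]
      have hstop' : ¬(m / 10 = 0 ∧ k / 10 = 0) := by
        intro hc; exact hstop ⟨by exact_mod_cast hc.1, by exact_mod_cast hc.2⟩
      have hfuel : m / 10 + k / 10 ≤ f := by omega
      rw [ih (m / 10) (k / 10) _ _ hfuel]
      congr 1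
      · by_cases h0 : m = 0
        · subst h0; simp [pureDigits_zero]
        · have : (m : Int) > 0 := by exact_mod_cast Nat.pos_of_ne_zero h0
          rw [if_pos this, List.append_assoc, pureDigits_pos m h0]
          rfl
      · by_cases h0 : k = 0
        · subst h0; simp [pureDigits_zero]
        · have : (k : Int) > 0 := by exact_mod_cast Nat.pos_of_ne_zero h0
          rw [if_pos this, List.append_assoc, pureDigits_pos k h0]
          rfl

-- 'ord(digitChar d) - 48 = d' for decimal digits
theorem digitChar_val (d : Nat) (hd : d < 10) :
    (((Nat.digitChar d).toNat : Int) - 48) = (d : Int) := by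
  interval_cases d <;> decide

-- str(m) reversed and mapped back to digit values is the canonical digit list
theorem toDigits_rev_map (m : Nat) (hm : m ≠ 0) :
    (Nat.toDigits 10 m).reverse.map (fun c => ((c.toNat : Int) - 48)) = pureDigits m := by
  induction m using Nat.strong_induction_on with
  | _ m ih =>
    by_cases hlt : m < 10
    · rw [Nat.toDigits_of_lt_base hlt]
      have h10 : m / 10 = 0 := Nat.div_eq_of_lt hlt
      have hmod : m % 10 = m := Nat.mod_eq_of_lt hlt
      rw [pureDigits_pos m hm, h10, pureDigits_zero, hmod]
      simp [digitChar_val m hlt]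
    · rw [Nat.toDigits_eq_if (by norm_num : 1 < 10), if_neg hlt,
        List.reverse_append, List.reverse_singleton, List.singleton_append, List.map_cons,
        ih (m / 10) (Nat.div_lt_self (Nat.pos_of_ne_zero hm) (by norm_num))
          (by omega),
        digitChar_val (m % 10) (Nat.mod_lt m (by norm_num)),
        pureDigits_pos m hm]

-- B's string-based helper computes the canonical digit list
theorem digitsStrB_eq (m : Nat) : digitsStrB (m : Int) = pureDigits m := by
  by_cases h0 : m = 0
  · subst h0; simp [digitsStrB, pureDigits_zero]
  · have hpos : ¬((m : Int) ≤ 0) := by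
      have := Nat.pos_of_ne_zero h0; omega
    rw [digitsStrB, if_neg hpos]
    have htc : PySem.Int.toChars (m : Int) = Nat.toDigits 10 m := by
      simp [PySem.Int.toChars, show ¬((m : Int) < 0) by omega]
    rw [htc, toDigits_rev_map m h0]

-- ===== VERDICT (by name: the statement is the Claim_ definition above) =====
theorem split_digits_mult_spec : Claim_equal_split_digits_mult := by
  intro a b _ hpre
  obtain ⟨ha, hb⟩ := hpre
  unfold Spec_split_digits_mult split_digits_mult split_digits_mult_alt
  obtain ⟨m, rfl⟩ := Int.eq_ofNat_of_zero_le ha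
  obtain ⟨k, rfl⟩ := Int.eq_ofNat_of_zero_le hb
  simp only [Int.natAbs_natCast]
  rw [splitLoopA_eq (m + k) m k [] [] (le_refl _), digitsStrB_eq m, digitsStrB_eq k]
  simp
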